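-- pv_equiv track=rewrite | github.com/broncbash/arch-installer | installer/ui/filesystem.py | _passphrase_strength
-- ===== SOURCE A (Python) =====
-- def _passphrase_strength(pw: str) -> tuple:
--     """
--     Return a (label, css_class) tuple describing passphrase strength.
--     Starts at Weak/red immediately on first character typed.
--     """
--     if not pw:
--         return "Weak", "passphrase-weak"
--     # Start at 1 so colour appears immediately
--     score = 1
--     if len(pw) >= 8:  score += 1
--     if len(pw) >= 12: score += 1
--     if len(pw) >= 16: score += 1
--     if any(c.isupper() for c in pw):     score += 1
--     if any(c.islower() for c in pw):     score += 1
--     if any(c.isdigit() for c in pw):     score += 1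
--     if any(not c.isalnum() for c in pw): score += 1
--
--     if score <= 2: return "Weak",   "passphrase-weak"
--     if score <= 4: return "Fair",   "passphrase-fair"
--     if score <= 6: return "Good",   "passphrase-good"
--     return              "Strong", "passphrase-strong"
-- ===== SOURCE B (Python) =====
-- def _passphrase_strength(pw: str) -> tuple:
--     """Classify passphrase strength via distinct character-class counting:
--     score = 1 + threshold indicators + |set of class labels|, tier picked from a table."""
--     if not pw:
--         return "Weak", "passphrase-weak"
--
--     def cls(c):
--         if c.isupper(): return "U"
--         if c.islower(): return "L"
--         if c.isdigit(): return "D"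
--         if not c.isalnum(): return "S"
--         return "A"
--
--     score = 1 + sum(len(pw) >= t for t in (8, 12, 16)) + len({cls(c) for c in pw})
--     for bound, label, css in ((2, "Weak", "passphrase-weak"),
--                               (4, "Fair", "passphrase-fair"),
--                               (6, "Good", "passphrase-good")):
--         if score <= bound:
--             return label, css
--     return "Strong", "passphrase-strong"
-- ===== Notes on version B (the rewrite author's own statement) =====
-- stated objective: alternative
-- what changed: B scores by classifying each character into a class label and counting the DISTINCT classes with a set (plus a sum of length-threshold indicators), then picks the tier from a (bound,label,css) table, instead of A's four any() scans plus an if-cascade.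
import Mathlib
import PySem

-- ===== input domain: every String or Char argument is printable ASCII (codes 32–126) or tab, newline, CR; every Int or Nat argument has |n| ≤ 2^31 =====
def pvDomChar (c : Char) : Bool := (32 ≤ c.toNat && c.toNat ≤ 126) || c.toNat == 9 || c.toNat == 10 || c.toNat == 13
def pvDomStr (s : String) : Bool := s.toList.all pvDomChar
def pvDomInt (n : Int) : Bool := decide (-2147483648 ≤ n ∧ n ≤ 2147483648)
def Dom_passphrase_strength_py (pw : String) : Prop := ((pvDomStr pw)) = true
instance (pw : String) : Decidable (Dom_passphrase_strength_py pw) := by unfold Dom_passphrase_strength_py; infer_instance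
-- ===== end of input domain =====

-- B replaces A's four any() scans + if-cascade by counting the DISTINCT character-class labels
-- with a set and picking the tier from a table (alternative decomposition, same cost).

-- ===== PORT A =====
def passphrase_strength_py (pw : String) : String × String :=
  if pw.toList = [] then ("Weak", "passphrase-weak")
  else
    let score : Int := 1
    let score := if 8 ≤ PySem.Chars.len pw.toList then score + 1 else score
    let score := if 12 ≤ PySem.Chars.len pw.toList then score + 1 else score
    let score := if 16 ≤ PySem.Chars.len pw.toList then score + 1 else score
    let score := if pw.toList.any PySem.Chars.isupper then score + 1 else score
    let score := if pw.toList.any PySem.Chars.islower then score + 1 else score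
    let score := if pw.toList.any PySem.Chars.isdigit then score + 1 else score
    let score := if pw.toList.any (fun c => !PySem.Chars.isalnum c) then score + 1 else score
    if score ≤ 2 then ("Weak", "passphrase-weak")
    else if score ≤ 4 then ("Fair", "passphrase-fair")
    else if score ≤ 6 then ("Good", "passphrase-good")
    else ("Strong", "passphrase-strong")

-- ===== PORT B =====
-- class label of a single character (Source B's cls)
def pvCls (c : Char) : String :=
  if PySem.Chars.isupper c then "U"
  else if PySem.Chars.islower c then "L"
  else if PySem.Chars.isdigit c then "D"
  else if !PySem.Chars.isalnum c then "S"
  else "A"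

-- the (bound, label, css) tier table of Source B
def pvTiers : List (Int × String × String) :=
  [(2, "Weak", "passphrase-weak"), (4, "Fair", "passphrase-fair"), (6, "Good", "passphrase-good")]

-- Source B's for-loop over the table with early return
def pvPickTier : List (Int × String × String) → Int → String × String
  | [], _ => ("Strong", "passphrase-strong")
  | (b, l, c) :: rest, s => if s ≤ b then (l, c) else pvPickTier rest s

def passphrase_strength_py_alt (pw : String) : String × String :=
  if pw.toList = [] then ("Weak", "passphrase-weak")
  else
    let score : Int := 1
      + (([8, 12, 16] : List Int).map
          (fun t => if t ≤ PySem.Chars.len pw.toList then (1 : Int) else 0)).sum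
      + ((PySem.Set.ofList (pw.toList.map pvCls)).length : Int)
    pvPickTier pvTiers score

-- ===== PRECONDITION & SPEC =====
def Spec_passphrase_strength_py (pw : String) (out : String × String) : Prop := out = passphrase_strength_py_alt pw
instance (pw : String) (out : String × String) : Decidable (Spec_passphrase_strength_py pw out) := by unfold Spec_passphrase_strength_py; infer_instance

-- ===== CLAIM (what is proved, stated in full; the proofs are below) =====
def Claim_equal_passphrase_strength_py : Prop := ∀ (pw : String), Dom_passphrase_strength_py pw → Spec_passphrase_strength_py pw (passphrase_strength_py pw)

-- ===== LEMMAS AND PROOFS =====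

-- pvCls is "U"/"L"/"D"/"S" exactly when the corresponding class test fires
-- (the ASCII ranges A-Z, a-z, 0-9 are pairwise disjoint, and isalnum is their union)
theorem pvCls_eq_U (c : Char) : pvCls c = "U" ↔ PySem.Chars.isupper c = true := by
  unfold pvCls; split_ifs with h1 h2 h3 h4 <;> simp_all

theorem pvCls_eq_L (c : Char) : pvCls c = "L" ↔ PySem.Chars.islower c = true := by
  unfold pvCls
  have : PySem.Chars.islower c = true → PySem.Chars.isupper c = false := by
    simp [PySem.Chars.islower, PySem.Chars.isupper, Char.le_def, UInt32.le_iff_toNat_le]; omega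
  split_ifs with h1 h2 h3 h4 <;> simp_all

theorem pvCls_eq_D (c : Char) : pvCls c = "D" ↔ PySem.Chars.isdigit c = true := by
  unfold pvCls
  have h1 : PySem.Chars.isdigit c = true → PySem.Chars.isupper c = false := by
    simp [PySem.Chars.isdigit, PySem.Chars.isupper, Char.le_def, UInt32.le_iff_toNat_le]; omega
  have h2 : PySem.Chars.isdigit c = true → PySem.Chars.islower c = false := by
    simp [PySem.Chars.isdigit, PySem.Chars.islower, Char.le_def, UInt32.le_iff_toNat_le]; omega
  split_ifs with g1 g2 g3 g4 <;> simp_all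

theorem pvCls_eq_S (c : Char) : pvCls c = "S" ↔ (!PySem.Chars.isalnum c) = true := by
  unfold pvCls
  simp only [PySem.Chars.isalnum, PySem.Chars.isalpha]
  split_ifs with h1 h2 h3 h4 <;> simp_all

theorem pvCls_mem (c : Char) : pvCls c ∈ (["U", "L", "D", "S"] : List String) := by
  unfold pvCls
  split_ifs with h1 h2 h3 h4 <;> simp_all [PySem.Chars.isalnum, PySem.Chars.isalpha]

-- cardinality of the class set = number of class tests that fire somewhere in cs
theorem pvSet_len (cs : List Char) :
    ((PySem.Set.ofList (cs.map pvCls)).length : Int) =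
      (if cs.any PySem.Chars.isupper then 1 else 0)
      + (if cs.any PySem.Chars.islower then 1 else 0)
      + (if cs.any PySem.Chars.isdigit then 1 else 0)
      + (if cs.any (fun c => !PySem.Chars.isalnum c) then 1 else 0) := by
  set S := PySem.Set.ofList (cs.map pvCls) with hS
  have hnd : S.Nodup := PySem.Set.nodup_ofList _
  have hmem : ∀ x, x ∈ S ↔ x ∈ cs.map pvCls := fun x => PySem.Set.mem_ofList ..
  have hperm : S.Perm ((["U", "L", "D", "S"] : List String).filter (fun x => decide (x ∈ S))) := by
    rw [List.perm_ext_iff_of_nodup hnd (List.Nodup.filter _ (by decide))]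
    intro a
    simp only [List.mem_filter, decide_eq_true_eq]
    constructor
    · intro ha
      refine ⟨?_, ha⟩
      rcases (hmem a).1 ha with h
      rcases List.mem_map.1 h with ⟨c, _, rfl⟩
      exact pvCls_mem c
    · exact fun h => h.2
  have hlen := hperm.length_eq
  have hU : ("U" ∈ S) ↔ cs.any PySem.Chars.isupper = true := by
    rw [hmem]; simp only [List.mem_map, List.any_eq_true]
    exact ⟨fun ⟨c, hc, e⟩ => ⟨c, hc, (pvCls_eq_U c).1 e⟩, fun ⟨c, hc, e⟩ => ⟨c, hc, (pvCls_eq_U c).2 e⟩⟩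
  have hL : ("L" ∈ S) ↔ cs.any PySem.Chars.islower = true := by
    rw [hmem]; simp only [List.mem_map, List.any_eq_true]
    exact ⟨fun ⟨c, hc, e⟩ => ⟨c, hc, (pvCls_eq_L c).1 e⟩, fun ⟨c, hc, e⟩ => ⟨c, hc, (pvCls_eq_L c).2 e⟩⟩
  have hD : ("D" ∈ S) ↔ cs.any PySem.Chars.isdigit = true := by
    rw [hmem]; simp only [List.mem_map, List.any_eq_true]
    exact ⟨fun ⟨c, hc, e⟩ => ⟨c, hc, (pvCls_eq_D c).1 e⟩, fun ⟨c, hc, e⟩ => ⟨c, hc, (pvCls_eq_D c).2 e⟩⟩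
  have hSp : ("S" ∈ S) ↔ cs.any (fun c => !PySem.Chars.isalnum c) = true := by
    rw [hmem]; simp only [List.mem_map, List.any_eq_true]
    exact ⟨fun ⟨c, hc, e⟩ => ⟨c, hc, (pvCls_eq_S c).1 e⟩, fun ⟨c, hc, e⟩ => ⟨c, hc, (pvCls_eq_S c).2 e⟩⟩
  rw [hlen]
  by_cases gU : cs.any PySem.Chars.isupper = true <;>
    by_cases gL : cs.any PySem.Chars.islower = true <;>
    by_cases gD : cs.any PySem.Chars.isdigit = true <;>
    by_cases gS : cs.any (fun c => !PySem.Chars.isalnum c) = true <;>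
    simp [List.filter, hU, hL, hD, hSp, gU, gL, gD, gS]

-- Source B's table loop agrees with A's cascade
theorem pvPickTier_eq (s : Int) :
    pvPickTier pvTiers s =
      (if s ≤ 2 then ("Weak", "passphrase-weak")
       else if s ≤ 4 then ("Fair", "passphrase-fair")
       else if s ≤ 6 then ("Good", "passphrase-good")
       else ("Strong", "passphrase-strong")) := by
  simp [pvTiers, pvPickTier]

-- ===== VERDICT (by name: the statement is the Claim_ definition above) =====
set_option maxHeartbeats 1000000 in
theorem passphrase_strength_py_spec : Claim_equal_passphrase_strength_py := by
  intro pw _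
  unfold Spec_passphrase_strength_py passphrase_strength_py passphrase_strength_py_alt
  by_cases h : pw.toList = []
  · simp [h]
  · rw [if_neg h, if_neg h, pvPickTier_eq, pvSet_len]
    simp only [List.map, List.sum_cons, List.sum_nil]
    generalize PySem.Chars.len pw.toList = n
    generalize pw.toList.any PySem.Chars.isupper = u
    generalize pw.toList.any PySem.Chars.islower = l
    generalize pw.toList.any PySem.Chars.isdigit = d
    generalize pw.toList.any (fun c => !PySem.Chars.isalnum c) = sp
    cases u <;> cases l <;> cases d <;> cases sp <;>
      by_cases h8 : (8:Int) ≤ n <;> by_cases h12 : (12:Int) ≤ n <;> by_cases h16 : (16:Int) ≤ n <;>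
      simp [h8, h12, h16]
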